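-- pv_equiv track=rewrite | github.com/gamez-code/at_most_twice | functionality/rest_one.py | rest_one
-- ===== SOURCE A (Python) =====
-- def rest_one(Array, idx):
--     if Array[idx]:
--         # Si el numero de Array[idx] es distinto a cero entra, ya que 0 - 1 es negativo.
--         if Array[idx]==1 and not idx:
--             # Si Array[idx] es igual a 1 y idx es igual a cero.
--             # Quiere decir que es el primer numero al restar se elimina.
--             Array.pop(idx)
--             return Array
--         else:
--             Array[idx] -= 1
--             if len(Array) - 1 == idx:
--                 return Array
--             else:
--                 Array[idx + 1::] = [9] * (len(Array) - (idx + 1))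
--                 return Array
--     elif idx:
--         # Si el idx es distinto a cero entra, cambia Array[idx] por 9 y resta al siguiente.
--         Array[idx] = 9
--         return rest_one(Array, idx - 1)
-- ===== SOURCE B (Python) =====
-- def rest_one(Array, idx):
--     # Non-mutating re-implementation: find the rightmost nonzero digit at or left
--     # of idx, then build the result by slicing (A mutates Array in place; the
--     # equivalence claimed is about the return value only).
--     j = idx
--     while j > 0 and Array[j] == 0:
--         j -= 1
--     if Array[j] == 0:
--         return None
--     if j == 0 and Array[0] == 1:
--         return [9] * idx + Array[idx + 1:]
--     return Array[:j] + [Array[j] - 1] + [9] * (len(Array) - j - 1)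
-- ===== Notes on version B (the rewrite author's own statement) =====
-- stated objective: alternative
-- what changed: Instead of A's tail recursion that mutates the list step by step (setting zeros to 9 while walking left), B scans once for the rightmost nonzero digit at or left of idx and builds the result directly from slices, without mutation.
-- outside the precondition, e.g. on rest_one([0, 5], -1): A returns [9, 9], B returns [0, 4, 9, 9]
import Mathlib
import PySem

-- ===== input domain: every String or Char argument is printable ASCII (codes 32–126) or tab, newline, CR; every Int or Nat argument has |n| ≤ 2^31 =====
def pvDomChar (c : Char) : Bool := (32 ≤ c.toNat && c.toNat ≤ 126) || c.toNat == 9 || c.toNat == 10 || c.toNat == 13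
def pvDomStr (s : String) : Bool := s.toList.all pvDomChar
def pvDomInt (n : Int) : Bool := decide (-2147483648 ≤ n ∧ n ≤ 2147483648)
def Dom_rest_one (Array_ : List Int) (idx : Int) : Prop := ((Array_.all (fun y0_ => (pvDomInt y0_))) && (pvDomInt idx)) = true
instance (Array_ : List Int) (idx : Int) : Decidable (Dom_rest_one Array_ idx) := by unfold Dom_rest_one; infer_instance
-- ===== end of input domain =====

-- B builds the return value from slices after one scan for the rightmost nonzero digit,
-- instead of A's mutating tail recursion; A mutates Array in place (B does not): the
-- equivalence proved is about the return value only.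

-- ===== PORT A =====
-- Literal port of A's tail recursion.  Python returns None (no list) when the walk
-- reaches index 0 on a zero digit, and raises IndexError when the index is out of
-- range; both are outside Pre_ and the port returns [] there.
def rest_one (Array_ : List Int) (idx : Int) : List Int :=
  match hv : PySem.List.pyGet? Array_ idx with
  | none => []                                   -- IndexError (outside Pre_)
  | some v =>
    if v ≠ 0 then
      if v = 1 ∧ idx = 0 then
        match PySem.List.pop? Array_ idx with    -- Array.pop(idx)
        | some r => r.2
        | none => []
      else
        -- Array[idx] -= 1
        let A1 := PySem.List.pySetD Array_ idx (v - 1)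
        if (A1.length : Int) - 1 = idx then A1
        else
          -- Array[idx+1::] = [9] * (len(Array) - (idx+1))
          PySem.List.slice A1 none (some (idx + 1)) ++
            PySem.List.pyRepeat [(9 : Int)] ((A1.length : Int) - (idx + 1))
    else if idx ≠ 0 then
      rest_one (PySem.List.pySetD Array_ idx 9) (idx - 1)
    else []                                      -- Python falls through: returns None (outside Pre_)
termination_by (idx + Array_.length + 1).toNat
decreasing_by
  have h := PySem.List.pyGet?_eq_none_iff (xs := Array_) (i := idx)
  simp [hv, PySem.Raise.InRange] at h
  simp [PySem.List.length_pySetD]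
  omega

-- ===== PORT B =====
-- B's scan: while j > 0 and Array[j] == 0: j -= 1   (pyGetD is exact under Pre_'s index bounds)
def findJ (Array_ : List Int) (j : Int) : Int :=
  if 0 < j ∧ PySem.List.pyGetD Array_ j 0 = 0 then findJ Array_ (j - 1) else j
termination_by j.toNat
decreasing_by omega

def rest_one_alt (Array_ : List Int) (idx : Int) : List Int :=
  let j := findJ Array_ idx
  if PySem.List.pyGetD Array_ j 0 = 0 then []    -- Python returns None (outside Pre_)
  else if j = 0 ∧ PySem.List.pyGetD Array_ 0 0 = 1 then
    PySem.List.pyRepeat [(9 : Int)] idx ++ PySem.List.slice Array_ (some (idx + 1)) none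
  else
    PySem.List.slice Array_ none (some j) ++ [PySem.List.pyGetD Array_ j 0 - 1] ++
      PySem.List.pyRepeat [(9 : Int)] ((Array_.length : Int) - j - 1)

-- ===== PRECONDITION & SPEC =====
-- Pre_ restricts to the routine's natural domain, a digit position 0 ≤ idx < len with a
-- nonzero digit somewhere in Array[:idx+1]: outside it A either raises IndexError, returns
-- None (no list), or is reached through Python's negative-index wraparound.
def Pre_rest_one (Array_ : List Int) (idx : Int) : Prop :=
  0 ≤ idx ∧ idx < (Array_.length : Int) ∧ ∃ x ∈ Array_.take (idx.toNat + 1), x ≠ 0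
instance (Array_ : List Int) (idx : Int) : Decidable (Pre_rest_one Array_ idx) := by
  unfold Pre_rest_one; infer_instance
def pvWitness_rest_one : List Int × Int := ([1, 0, 0], 2)

def Spec_rest_one (Array_ : List Int) (idx : Int) (out : List Int) : Prop := out = rest_one_alt Array_ idx
instance (Array_ : List Int) (idx : Int) (out : List Int) : Decidable (Spec_rest_one Array_ idx out) := by unfold Spec_rest_one; infer_instance

-- ===== CLAIM (what is proved, stated in full; the proofs are below) =====
def Claim_equal_rest_one : Prop := ∀ (Array_ : List Int) (idx : Int), Dom_rest_one Array_ idx → Pre_rest_one Array_ idx → Spec_rest_one Array_ idx (rest_one Array_ idx)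


-- ===== LEMMAS AND PROOFS =====

theorem findJ_nonpos (xs : List Int) (j : Int) (h : j ≤ 0) : findJ xs j = j := by
  rw [findJ]; simp [show ¬ 0 < j by omega]

theorem findJ_of_ne_cond (xs : List Int) (j : Int)
    (h : ¬(0 < j ∧ PySem.List.pyGetD xs j 0 = 0)) : findJ xs j = j := by
  rw [findJ]; simp [h]

theorem findJ_of_ne (xs : List Int) (j : Int) (h : PySem.List.pyGetD xs j 0 ≠ 0) :
    findJ xs j = j := by
  rw [findJ]; simp [h]

theorem findJ_step (xs : List Int) (j : Int) (h0 : 0 < j)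
    (h : PySem.List.pyGetD xs j 0 = 0) : findJ xs j = findJ xs (j - 1) := by
  rw [findJ]; simp [h0, h]

theorem findJ_le (xs : List Int) (j : Int) : findJ xs j ≤ j := by
  induction j using findJ.induct xs with
  | case1 j h ih => rw [findJ_step xs j h.1 h.2]; omega
  | case2 j h => rw [findJ]; simp [h]

theorem findJ_nonneg (xs : List Int) (j : Int) (h : 0 ≤ j) : 0 ≤ findJ xs j := by
  induction j using findJ.induct xs with
  | case1 j hc ih => rw [findJ_step xs j hc.1 hc.2]; exact ih (by omega)
  | case2 j hc => rw [findJ_of_ne_cond xs j hc]; exact h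

theorem pyGetD_set_ne (xs : List Int) (n : Nat) (a : Int) (j : Int)
    (h0 : 0 ≤ j) (hne : j.toNat ≠ n) :
    PySem.List.pyGetD (xs.set n a) j 0 = PySem.List.pyGetD xs j 0 := by
  rw [PySem.List.pyGetD_of_nonneg _ _ h0, PySem.List.pyGetD_of_nonneg _ _ h0,
    List.getD, List.getD, List.getElem?_set_ne (by omega)]

theorem findJ_set_high (xs : List Int) (n : Nat) (a : Int) :
    ∀ (m : Nat) (j : Int), j.toNat ≤ m → j < (n : Int) →
      findJ (xs.set n a) j = findJ xs j := by
  intro m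
  induction m with
  | zero =>
    intro j hj _
    have h0 : j ≤ 0 := by omega
    rw [findJ_nonpos _ _ h0, findJ_nonpos _ _ h0]
  | succ m ih =>
    intro j hj hjn
    by_cases h0 : 0 < j
    · have hget : PySem.List.pyGetD (xs.set n a) j 0 = PySem.List.pyGetD xs j 0 :=
        pyGetD_set_ne xs n a j (by omega) (by omega)
      by_cases hz : PySem.List.pyGetD xs j 0 = 0
      · rw [findJ_step _ _ h0 (by rw [hget]; exact hz), findJ_step _ _ h0 hz,
          ih (j - 1) (by omega) (by omega)]
      · rw [findJ_of_ne _ _ (by rw [hget]; exact hz), findJ_of_ne _ _ hz]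
    · rw [findJ_nonpos _ _ (by omega), findJ_nonpos _ _ (by omega)]

theorem set_take_succ (xs : List Int) (k : Nat) (a : Int) (h : k < xs.length) :
    (xs.set k a).take (k + 1) = xs.take k ++ [a] := by
  rw [List.set_eq_take_cons_drop a h, List.take_append]
  simp [List.length_take, Nat.min_eq_left (Nat.le_of_lt h)]

theorem set_drop_self (xs : List Int) (k : Nat) (a : Int) (h : k < xs.length) :
    (xs.set k a).drop k = a :: xs.drop (k + 1) := by
  rw [List.set_eq_take_cons_drop a h, List.drop_append]
  simp [List.length_take, Nat.min_eq_left (Nat.le_of_lt h)]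

theorem main_nonzero (Array_ : List Int) (k : Nat) (hk : k < Array_.length)
    (hv : Array_[k] ≠ 0) : rest_one Array_ (k : Int) = rest_one_alt Array_ (k : Int) := by
  have hsome : PySem.List.pyGet? Array_ (k : Int) = some Array_[k] := by
    simp [List.getElem?_eq_getElem hk]
  have hgetD : PySem.List.pyGetD Array_ (k : Int) 0 = Array_[k] := by
    simp [List.getD, List.getElem?_eq_getElem hk]
  have hJ : findJ Array_ (k : Int) = (k : Int) := findJ_of_ne _ _ (by rw [hgetD]; exact hv)
  rw [rest_one, hsome]
  rw [rest_one_alt]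
  simp only [hJ, hgetD, if_pos hv]
  by_cases hc : Array_[k] = 1 ∧ (k : Int) = 0
  · -- pop branch
    have hk0 : k = 0 := by exact_mod_cast hc.2
    subst hk0
    simp only [Nat.cast_zero] at hgetD ⊢
    have hpop : PySem.List.pop? Array_ (0 : Int) = some (Array_[0], Array_.eraseIdx 0) := by
      have h := PySem.List.pop?_natCast (xs := Array_) (n := 0) hk
      simpa using h
    simp [hpop, hc.1, hgetD, PySem.List.slice_from_one, List.eraseIdx_zero]
  · -- decrement branch
    have hcB : ¬((k : Int) = 0 ∧ PySem.List.pyGetD Array_ 0 0 = 1) := by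
      rintro ⟨hz, h1⟩
      have hk0 : k = 0 := by exact_mod_cast hz
      subst hk0
      simp only [Nat.cast_zero] at hgetD
      exact hc ⟨by rw [← hgetD]; exact h1, by simp⟩
    rw [if_neg hc, if_neg hcB]
    simp only [PySem.List.pySetD_natCast, List.length_set,
      PySem.List.slice_to_natCast, PySem.List.pyRepeat_singleton]
    split_ifs with hlast
    · -- idx is the last index
      have hlen : Array_.length = k + 1 := by omega
      rw [List.set_eq_take_cons_drop _ hk]
      have hdrop : Array_.drop (k + 1) = [] := by
        apply List.drop_eq_nil_of_le; omega
      have hrep : ((Array_.length : Int) - (k : Int) - 1).toNat = 0 := by omega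
      simp [hdrop, hrep]
    · -- fill the tail with nines
      have h1 : ((k : Int) + 1) = ((k + 1 : Nat) : Int) := by push_cast; ring
      rw [h1, PySem.List.slice_to_natCast, set_take_succ Array_ k _ hk]
      have hrep : ((Array_.length : Int) - ((k + 1 : Nat) : Int)).toNat
          = ((Array_.length : Int) - (k : Int) - 1).toNat := by omega
      rw [hrep]

theorem take_one_of_pos (xs : List Int) (h : 0 < xs.length) : xs.take 1 = [xs[0]] := by
  have := List.take_succ_eq_append_getElem (l := xs) (i := 0) h
  simpa using this

theorem rest_one_main_aux : ∀ (m : Nat) (Array_ : List Int) (idx : Int),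
    idx.toNat ≤ m → Pre_rest_one Array_ idx →
    rest_one Array_ idx = rest_one_alt Array_ idx := by
  intro m
  induction m with
  | zero =>
    intro Array_ idx hm hpre
    obtain ⟨h0, hlen, x, hx, hxne⟩ := hpre
    have hidx : idx = ((0 : Nat) : Int) := by simp; omega
    subst hidx
    have hk : 0 < Array_.length := by exact_mod_cast hlen
    have hv : Array_[0] ≠ 0 := by
      simp only [Int.toNat_natCast, take_one_of_pos Array_ hk, List.mem_singleton] at hx
      rw [← hx]; exact hxne
    exact main_nonzero Array_ 0 hk hv
  | succ m ih =>
    intro Array_ idx hm hpre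
    obtain ⟨h0, hlen, x, hx, hxne⟩ := hpre
    obtain ⟨k, rfl⟩ : ∃ k : Nat, idx = (k : Int) := ⟨idx.toNat, by omega⟩
    have hk : k < Array_.length := by exact_mod_cast hlen
    by_cases hv : Array_[k] = 0
    · -- the digit at idx is 0: A walks left after setting it to 9
      have hgetD : PySem.List.pyGetD Array_ (k : Int) 0 = Array_[k] := by
        simp [List.getD, List.getElem?_eq_getElem hk]
      have hxtake : x ∈ Array_.take (k + 1) := by
        simpa using hx
      have hkpos : k ≠ 0 := by
        rintro rfl
        rw [show 0 + 1 = 1 from rfl, take_one_of_pos Array_ hk, List.mem_singleton] at hxtake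
        exact hxne (hxtake.trans hv)
      have hxk : x ∈ Array_.take k := by
        rw [List.take_succ_eq_append_getElem hk, List.mem_append, List.mem_singleton] at hxtake
        rcases hxtake with h | h
        · exact h
        · exact absurd (h.trans hv) hxne
      have hsome : PySem.List.pyGet? Array_ (k : Int) = some Array_[k] := by
        simp [List.getElem?_eq_getElem hk]
      rw [rest_one, hsome]
      have hk0 : ((k : Nat) : Int) ≠ 0 := by exact_mod_cast hkpos
      simp only [hv, ne_eq, not_true_eq_false, if_false, hk0, not_false_eq_true, if_true]
      have hsd : PySem.List.pySetD Array_ ((k : Nat) : Int) 9 = Array_.set k 9 :=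
        PySem.List.pySetD_natCast Array_ k 9
      rw [hsd]
      have hpre2 : Pre_rest_one (Array_.set k 9) ((k : Int) - 1) := by
        refine ⟨by omega, by rw [List.length_set]; omega, x, ?_, hxne⟩
        have ht : ((k : Int) - 1).toNat + 1 = k := by omega
        rw [ht, List.take_set_of_le (le_refl k)]
        exact hxk
      rw [ih (Array_.set k 9) ((k : Int) - 1) (by omega) hpre2]
      -- now both sides are rest_one_alt; show they agree
      have hJ1 : findJ Array_ (k : Int) = findJ Array_ ((k : Int) - 1) :=
        findJ_step _ _ (by omega) (by rw [hgetD]; exact hv)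
      have hJ2 : findJ (Array_.set k 9) ((k : Int) - 1) = findJ Array_ ((k : Int) - 1) :=
        findJ_set_high Array_ k 9 ((k : Int) - 1).toNat ((k : Int) - 1) (le_refl _) (by omega)
      have hj0 : 0 ≤ findJ Array_ ((k : Int) - 1) := findJ_nonneg _ _ (by omega)
      have hjle : findJ Array_ ((k : Int) - 1) ≤ (k : Int) - 1 := findJ_le _ _
      have hgj : PySem.List.pyGetD (Array_.set k 9) (findJ Array_ ((k : Int) - 1)) 0
          = PySem.List.pyGetD Array_ (findJ Array_ ((k : Int) - 1)) 0 :=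
        pyGetD_set_ne _ _ _ _ hj0 (by omega)
      have hg0 : PySem.List.pyGetD (Array_.set k 9) 0 0 = PySem.List.pyGetD Array_ 0 0 :=
        pyGetD_set_ne _ _ _ _ (le_refl 0) (by omega)
      rw [rest_one_alt, rest_one_alt]
      simp only [hJ1, hJ2, hgj, hg0]
      split_ifs with hz hpop
      · rfl
      · -- Array[0] == 1 reached: compare the two slice expressions
        rw [show (k : Int) - 1 + 1 = ((k : Nat) : Int) by ring]
        rw [PySem.List.slice_from (Array_.set k 9) (by omega), PySem.List.slice_from Array_ (by omega)]
        rw [show ((k : Int)).toNat = k by omega, show ((k : Int) + 1).toNat = k + 1 by omega]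
        rw [set_drop_self Array_ k 9 hk]
        rw [PySem.List.pyRepeat_singleton, PySem.List.pyRepeat_singleton]
        rw [show ((k : Int) - 1).toNat = k - 1 by omega, show ((k : Int)).toNat = k by omega]
        rw [show k = (k - 1) + 1 by omega, List.replicate_succ']
        simp [show k - 1 + 1 = k by omega]
      · -- general branch: the prefix below j is untouched by the set at k
        rw [PySem.List.slice_to (Array_.set k 9) hj0, PySem.List.slice_to Array_ hj0,
          List.take_set_of_le (by omega), List.length_set]
    · exact main_nonzero Array_ k hk hv

-- ===== VERDICT (by name: the statement is the Claim_ definition above) =====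
theorem rest_one_spec : Claim_equal_rest_one := by
  intro Array_ idx _ hpre
  exact rest_one_main_aux idx.toNat Array_ idx (le_refl _) hpre
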